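-- pv_equiv track=rewrite | github.com/west-heinsberg/EGE26 | task25/03_02_2026/25_23207.py | f
-- ===== SOURCE A (Python) =====
-- def is_prime(num):
--     if num < 2: return False
--     for i in range(2, int(num ** .5) + 1):
--         if num % i == 0:
--             return False
--     return True
--
-- def f(num):
--     d = [] # *
--
--     for i in range(2, int(num ** .5) + 1):      # 2 - минимальное простое число
--         if num % i == 0:
--             if is_prime(i) and str(i).count('5') == 1:
--                 d += [i]
--             if is_prime(num // i) and str(num // i).count('5') == 1:
--                 d += [num // i]
--
--     if len(d) == 2 and d[0] * d[1] == num: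
--         return max(d)
--     return 0 # 0 чтобы одинаковый тип данных был
-- ===== SOURCE B (Python) =====
-- def f(num):
--     if num < 2:
--         return 0
--     factors = []
--     n = num
--     d = 2
--     while d * d <= n:
--         if n % d == 0:
--             factors.append(d)
--             n //= d
--         else:
--             d += 1
--     if n > 1:
--         factors.append(n)
--     if len(factors) == 2 and all(str(p).count('5') == 1 for p in factors):
--         return factors[1]
--     return 0
-- ===== Notes on version B (the rewrite author's own statement) =====
-- stated objective: alternative
-- what changed: B computes the full prime factorization of num by a single divide-out trial-division loop and checks len==2 with the '5'-digit condition on both factors, instead of A's scan of every i up to sqrt(num) with per-divisor is_prime trial divisions.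
import Mathlib
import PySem

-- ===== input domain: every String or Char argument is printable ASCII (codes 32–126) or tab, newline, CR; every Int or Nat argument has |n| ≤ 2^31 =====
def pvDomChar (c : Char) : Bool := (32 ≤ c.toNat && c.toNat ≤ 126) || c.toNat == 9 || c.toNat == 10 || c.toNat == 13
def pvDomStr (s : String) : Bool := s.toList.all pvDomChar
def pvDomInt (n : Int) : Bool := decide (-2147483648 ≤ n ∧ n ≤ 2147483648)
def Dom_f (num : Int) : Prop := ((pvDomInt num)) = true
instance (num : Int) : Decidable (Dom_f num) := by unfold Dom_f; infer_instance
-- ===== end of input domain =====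

-- B replaces A's sqrt-range divisor scan with per-divisor is_prime trial divisions by a single
-- divide-out trial-division factorization loop; equal on all num ≥ 0 (A raises TypeError below 0, B returns 0).

-- ===== PORT A =====
-- str(n).count('5') == 1, shared verbatim by both ports
def one5 (n : Int) : Bool := PySem.Str.count (PySem.Int.toStr n) "5" == 1

-- int(num ** .5): exact as Int.sqrt for 0 ≤ num ≤ 2^31 (float sqrt is exact there; checked against CPython)
def isPrime (num : Int) : Bool :=
  if num < 2 then false
  else (PySem.List.pyRange 2 (Int.sqrt num + 1) 1).all (fun i => !(PySem.Int.mod num i == 0))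

def f (num : Int) : Int :=
  let d : List Int := (PySem.List.pyRange 2 (Int.sqrt num + 1) 1).foldl
    (fun acc i =>
      if PySem.Int.mod num i == 0 then
        let acc1 := if isPrime i && one5 i then acc ++ [i] else acc
        if isPrime (PySem.Int.floordiv num i) && one5 (PySem.Int.floordiv num i) then
          acc1 ++ [PySem.Int.floordiv num i]
        else acc1
      else acc) []
  match d with
  | [a, b] => if a * b == num then max a b else 0
  | _ => 0

-- ===== PORT B =====
-- the while-loop of Source B; fuel only makes the recursion structural (never exhausted for the fuel f_alt passes)
def bLoop : Nat → Int → Int → List Int → List Int × Int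
  | 0, n, _, acc => (acc, n)
  | fuel+1, n, d, acc =>
    if d * d ≤ n then
      if PySem.Int.mod n d == 0 then bLoop fuel (PySem.Int.floordiv n d) d (acc ++ [d])
      else bLoop fuel n (d + 1) acc
    else (acc, n)

def f_alt (num : Int) : Int :=
  if num < 2 then 0
  else
    let r := bLoop (2 * num.toNat + 2) num 2 []
    let factors := if r.2 > 1 then r.1 ++ [r.2] else r.1
    if PySem.List.len factors == 2 && factors.all (fun p => one5 p) then
      PySem.List.pyGetD factors 1 0
    else 0

-- ===== PRECONDITION & SPEC =====
-- A raises TypeError for num < 0 (int(num**.5) on a complex number); Pre_ excludes exactly those inputs.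
def Pre_f (num : Int) : Prop := 0 ≤ num
instance (num : Int) : Decidable (Pre_f num) := by unfold Pre_f; infer_instance
def pvWitness_f : Int := 3127

def Spec_f (num : Int) (out : Int) : Prop := out = f_alt num
instance (num : Int) (out : Int) : Decidable (Spec_f num out) := by unfold Spec_f; infer_instance

-- ===== CLAIM (what is proved, stated in full; the proofs are below) =====
def Claim_equal_f : Prop := ∀ (num : Int), Dom_f num → Pre_f num → Spec_f num (f num)

-- ===== LEMMAS AND PROOFS =====

-- B side: the loop produces the prime factorization
theorem bLoop_char (fuel : Nat) : ∀ (n d : Nat) (acc : List Int), 1 ≤ n → 2 ≤ d →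
    (∀ k, 2 ≤ k → k < d → ¬ (k ∣ n)) → 2 * n + 2 - d ≤ fuel →
    (bLoop fuel (n : Int) (d : Int) acc).1 ++
      (if (bLoop fuel (n : Int) (d : Int) acc).2 > 1 then [(bLoop fuel (n : Int) (d : Int) acc).2] else []) =
    acc ++ (n.primeFactorsList.map (fun p => (p : Int))) := by
  induction fuel with
  | zero =>
    intro n d acc h1 h2 hH hfuel
    have hn1 : n = 1 := by
      by_contra hne
      have hp := Nat.minFac_prime hne
      have hdvd := Nat.minFac_dvd n
      have hle : n.minFac ≤ n := Nat.le_of_dvd (by omega) hdvd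
      exact hH n.minFac hp.two_le (by omega) hdvd
    subst hn1
    simp [bLoop]
  | succ fuel ih =>
    intro n d acc h1 h2 hH hfuel
    simp only [bLoop]
    by_cases hsq : (d : Int) * (d : Int) ≤ (n : Int)
    · have hsqn : d * d ≤ n := by exact_mod_cast hsq
      have hdn : d ≤ n := le_trans (Nat.le_mul_of_pos_left d (by omega)) hsqn
      have hn2 : 2 ≤ n := by nlinarith
      rw [if_pos hsq]
      by_cases hmod : d ∣ n
      · have hmodz : (PySem.Int.mod (n : Int) (d : Int) == 0) = true := by
          rw [beq_iff_eq, PySem.Int.mod_eq_zero_iff_dvd]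
          exact_mod_cast hmod
        rw [if_pos hmodz]
        have hfd : PySem.Int.floordiv (n : Int) (d : Int) = ((n / d : Nat) : Int) :=
          PySem.Int.floordiv_natCast n d
        rw [hfd]
        have hquot1 : 1 ≤ n / d := (Nat.one_le_div_iff (by omega)).mpr hdn
        have hH' : ∀ k, 2 ≤ k → k < d → ¬ (k ∣ n / d) := by
          intro k hk1 hk2 hkd
          exact hH k hk1 hk2 (hkd.trans (Nat.div_dvd_of_dvd hmod))
        have hhalf : n / d ≤ n / 2 := Nat.div_le_div_left h2 (by omega)
        have hfuel' : 2 * (n / d) + 2 - d ≤ fuel := by omega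
        have key := ih (n / d) d (acc ++ [(d : Int)]) hquot1 h2 hH' hfuel'
        rw [key]
        have hdmf : n.minFac = d := by
          have hle := Nat.minFac_le_of_dvd h2 hmod
          have hmp := Nat.minFac_prime (by omega : n ≠ 1)
          have := Nat.minFac_dvd n
          by_contra hne
          exact hH n.minFac hmp.two_le (by omega) this
        have hunf : n.primeFactorsList = n.minFac :: (n / n.minFac).primeFactorsList := by
          obtain ⟨m, rfl⟩ : ∃ m, n = m + 2 := ⟨n - 2, by omega⟩
          rw [Nat.primeFactorsList]
        rw [hunf, hdmf]
        simp
      · have hmodz : (PySem.Int.mod (n : Int) (d : Int) == 0) = false := by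
          rw [beq_eq_false_iff_ne, ne_eq, PySem.Int.mod_eq_zero_iff_dvd]
          exact_mod_cast hmod
        rw [if_neg (show ¬ ((PySem.Int.mod (n:Int) (d:Int) == 0) = true) by rw [hmodz]; simp)]
        have hH' : ∀ k, 2 ≤ k → k < d + 1 → ¬ (k ∣ n) := by
          intro k hk1 hk2 hkd
          rcases Nat.lt_succ_iff_lt_or_eq.mp hk2 with hlt | rfl
          · exact hH k hk1 hlt hkd
          · exact hmod hkd
        have key := ih n (d + 1) acc h1 (by omega) hH' (by omega)
        have hcast : (d : Int) + 1 = ((d + 1 : Nat) : Int) := by push_cast; ring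
        rw [hcast]
        exact key
    · rw [if_neg hsq]
      have hsqn : ¬ (d * d ≤ n) := by exact_mod_cast hsq
      rcases Nat.lt_or_ge n 2 with hn2 | hn2
      · have hn1 : n = 1 := by omega
        subst hn1
        simp
      · have hprime : n.Prime := by
          by_contra hnp
          have hmf := Nat.minFac_prime (by omega : n ≠ 1)
          have hsq2 := Nat.minFac_sq_le_self (by omega : 0 < n) hnp
          have hlt : n.minFac < d := by nlinarith [hmf.two_le]
          exact hH n.minFac hmf.two_le hlt (Nat.minFac_dvd n)
        rw [Nat.primeFactorsList_prime hprime]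
        have : ((n : Int) > 1) = True := by simp; exact_mod_cast hn2
        simp [this]

theorem f_alt_char (num : Int) (h : 2 ≤ num) :
    f_alt num = (let F := num.toNat.primeFactorsList.map (fun p => (p : Int))
      if PySem.List.len F == 2 && F.all (fun p => one5 p) then PySem.List.pyGetD F 1 0 else 0) := by
  obtain ⟨N, rfl⟩ : ∃ N : Nat, num = (N : Int) := ⟨num.toNat, by omega⟩
  have hN2 : 2 ≤ N := by exact_mod_cast h
  unfold f_alt
  rw [if_neg (by omega), Int.toNat_natCast]
  have key := bLoop_char (2 * N + 2) N 2 [] (by omega) le_rfl (by intro k hk1 hk2; omega) (by omega)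
  have hc2 : ((2 : Nat) : Int) = (2 : Int) := by norm_num
  rw [hc2] at key
  simp only [List.nil_append] at key
  rw [← key]
  set r := bLoop (2 * N + 2) (N : Int) 2 [] with hr
  by_cases hgt : r.2 > 1 <;> simp [hgt]

-- isPrime agrees with Nat.Prime on casts
theorem isPrime_iff (n : Nat) : isPrime (n : Int) = true ↔ n.Prime := by
  unfold isPrime
  rw [Nat.prime_def_le_sqrt]
  by_cases h : (n : Int) < 2
  · have hn : n < 2 := by exact_mod_cast h
    simp [h]; omega
  · simp only [if_neg h, List.all_eq_true]
    have hn2 : 2 ≤ n := by omega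
    constructor
    · intro hall
      refine ⟨hn2, fun m hm2 hms hdvd => ?_⟩
      have hmem : (m : Int) ∈ PySem.List.pyRange 2 (Int.sqrt (n : Int) + 1) 1 := by
        rw [PySem.List.mem_pyRange_one, Int.sqrt_natCast]
        constructor
        · exact_mod_cast hm2
        · have : (m : Int) ≤ (Nat.sqrt n : Int) := by exact_mod_cast hms
          omega
      have := hall _ hmem
      simp only [Bool.not_eq_eq_eq_not, Bool.not_true, beq_eq_false_iff_ne, ne_eq] at this
      exact this ((PySem.Int.mod_eq_zero_iff_dvd _ _).mpr (by exact_mod_cast hdvd))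
    · rintro ⟨_, hnd⟩ i hi
      rw [PySem.List.mem_pyRange_one, Int.sqrt_natCast] at hi
      have hi0 : 0 ≤ i := by omega
      obtain ⟨m, rfl⟩ : ∃ m : Nat, i = (m : Int) := ⟨i.toNat, by omega⟩
      have hm2 : 2 ≤ m := by exact_mod_cast hi.1
      have hms : m ≤ Nat.sqrt n := by
        have := hi.2; omega
      simp only [Bool.not_eq_eq_eq_not, Bool.not_true, beq_eq_false_iff_ne, ne_eq]
      intro hmod
      rw [PySem.Int.mod_eq_zero_iff_dvd] at hmod
      exact hnd m hm2 hms (by exact_mod_cast hmod)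

-- A's accumulated list, as a flatMap
def gA (num : Int) (i : Int) : List Int :=
  (if isPrime i && one5 i then [i] else []) ++
  (if isPrime (PySem.Int.floordiv num i) && one5 (PySem.Int.floordiv num i) then [PySem.Int.floordiv num i] else [])

theorem f_eq_flatMap (num : Int) :
    f num = (match (PySem.List.pyRange 2 (Int.sqrt num + 1) 1).flatMap
        (fun i => if PySem.Int.mod num i == 0 then gA num i else []) with
      | [a, b] => if a * b == num then max a b else 0
      | _ => 0) := by
  unfold f
  rw [show (PySem.List.pyRange 2 (Int.sqrt num + 1) 1).foldl
      (fun acc i =>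
        if PySem.Int.mod num i == 0 then
          let acc1 := if isPrime i && one5 i then acc ++ [i] else acc
          if isPrime (PySem.Int.floordiv num i) && one5 (PySem.Int.floordiv num i) then
            acc1 ++ [PySem.Int.floordiv num i]
          else acc1
        else acc) [] =
    (PySem.List.pyRange 2 (Int.sqrt num + 1) 1).foldl
      (fun acc i => acc ++ (if PySem.Int.mod num i == 0 then gA num i else [])) [] from ?_]
  · rw [PySem.List.foldl_append_eq_flatMap]
    simp only [List.nil_append]
  · apply PySem.List.foldl_congr_mem
    intro acc i _
    by_cases h : PySem.Int.mod num i == 0 <;> simp only [h, if_pos, gA] <;> split_ifs <;> simp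

-- divisors of a semiprime within [2, sqrt]
theorem semiprime_divisor_in_range (p q i : Nat) (hp : p.Prime) (hq : q.Prime) (hpq : p ≤ q)
    (h2 : 2 ≤ i) (hs : i ≤ Nat.sqrt (p*q)) (hdvd : i ∣ p*q) : i = p := by
  have hii : i * i ≤ p * q := Nat.le_sqrt.mp (by exact_mod_cast hs)
  rcases hp.eq_one_or_self_of_dvd _ (Nat.gcd_dvd_right i p) with h1 | h1
  · have hcop : Nat.Coprime i p := h1
    have hiq : i ∣ q := hcop.dvd_of_dvd_mul_left hdvd
    rcases hq.eq_one_or_self_of_dvd i hiq with rfl | rfl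
    · omega
    · have hqp : i ≤ p := by nlinarith [hq.pos, hp.pos]
      omega
  · have hpi : p ∣ i := h1 ▸ Nat.gcd_dvd_left i p
    obtain ⟨j, rfl⟩ := hpi
    have hjq : j ∣ q := (mul_dvd_mul_iff_left hp.pos.ne').mp hdvd
    rcases hq.eq_one_or_self_of_dvd j hjq with rfl | rfl
    · omega
    · nlinarith [hp.two_le, hq.two_le]

-- a flatMap whose only contributing element is x0
theorem flatMap_single (l : List Int) (g : Int → List Int) (x0 : Int)
    (hmem : x0 ∈ l) (hnd : l.Nodup) (hz : ∀ x ∈ l, x ≠ x0 → g x = []) : l.flatMap g = g x0 := by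
  induction l with
  | nil => cases hmem
  | cons a t ih =>
    rw [List.flatMap_cons]
    rcases List.mem_cons.mp hmem with rfl | hmem'
    · have ht : t.flatMap g = [] := by
        apply List.flatMap_eq_nil_iff.mpr
        intro x hx
        exact hz x (List.mem_cons_of_mem _ hx) (fun h => (List.nodup_cons.mp hnd).1 (h ▸ hx))
      simp [ht]
    · have ha : g a = [] :=
        hz a List.mem_cons_self (by rintro rfl; exact (List.nodup_cons.mp hnd).1 hmem')
      rw [ha, List.nil_append]
      exact ih hmem' (List.nodup_cons.mp hnd).2 (fun x hx hne => hz x (List.mem_cons_of_mem _ hx) hne)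

-- every element A accumulates is a (cast) prime
theorem mem_dA (N : Nat) (x : Int)
    (hx : x ∈ (PySem.List.pyRange 2 (Int.sqrt (N : Int) + 1) 1).flatMap
        (fun i => if PySem.Int.mod (N : Int) i == 0 then gA (N : Int) i else [])) :
    ∃ m : Nat, x = (m : Int) ∧ m.Prime := by
  rw [List.mem_flatMap] at hx
  obtain ⟨i, hi, hxi⟩ := hx
  rw [PySem.List.mem_pyRange_one] at hi
  by_cases hmod : (PySem.Int.mod (N : Int) i == 0) = true
  · rw [if_pos hmod] at hxi
    unfold gA at hxi
    rw [List.mem_append] at hxi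
    rcases hxi with hx1 | hx2
    · by_cases hc : (isPrime i && one5 i) = true
      · rw [if_pos hc] at hx1
        have hxe : x = i := by simpa using hx1
        subst hxe
        obtain ⟨m, rfl⟩ : ∃ m : Nat, x = (m : Int) := ⟨x.toNat, by omega⟩
        exact ⟨m, rfl, (isPrime_iff m).mp (Bool.and_elim_left hc)⟩
      · rw [if_neg hc] at hx1; cases hx1
    · by_cases hc : (isPrime (PySem.Int.floordiv (N : Int) i) && one5 (PySem.Int.floordiv (N : Int) i)) = true
      · rw [if_pos hc] at hx2
        have hxe : x = PySem.Int.floordiv (N : Int) i := by simpa using hx2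
        subst hxe
        obtain ⟨m, rfl⟩ : ∃ m : Nat, i = (m : Int) := ⟨i.toNat, by omega⟩
        rw [PySem.Int.floordiv_natCast N m] at hc ⊢
        exact ⟨N / m, rfl, (isPrime_iff _).mp (Bool.and_elim_left hc)⟩
      · rw [if_neg hc] at hx2; cases hx2
  · rw [if_neg hmod] at hxi; cases hxi

theorem pyGetD_pair (a b : Int) : PySem.List.pyGetD [a, b] 1 0 = b := rfl

theorem f_spec_ge2 (num : Int) (hd : Dom_f num) (h : 2 ≤ num) : f num = f_alt num := by
  obtain ⟨N, rfl⟩ : ∃ N : Nat, num = (N : Int) := ⟨num.toNat, by omega⟩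
  have hN2 : 2 ≤ N := by exact_mod_cast h
  have hNne : N ≠ 0 := by omega
  rw [f_eq_flatMap, f_alt_char _ h, Int.toNat_natCast]
  rcases hL : N.primeFactorsList with _ | ⟨p, _ | ⟨q, rest⟩⟩
  · exfalso
    have hprod := Nat.prod_primeFactorsList hNne
    rw [hL] at hprod; simp at hprod; omega
  · -- N prime: no divisor in [2, sqrt N], A's list is empty
    have hpN : p = N := by
      have hprod := Nat.prod_primeFactorsList hNne
      rw [hL] at hprod; simpa using hprod
    subst hpN
    have hNp : p.Prime := Nat.prime_of_mem_primeFactorsList (hL ▸ List.mem_cons_self)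
    have hflat : (PySem.List.pyRange 2 (Int.sqrt (p : Int) + 1) 1).flatMap
        (fun i => if PySem.Int.mod (p : Int) i == 0 then gA (p : Int) i else []) = [] := by
      apply List.flatMap_eq_nil_iff.mpr
      intro i hi
      rw [PySem.List.mem_pyRange_one, Int.sqrt_natCast] at hi
      rw [if_neg]
      intro hmod
      rw [beq_iff_eq, PySem.Int.mod_eq_zero_iff_dvd] at hmod
      obtain ⟨m, rfl⟩ : ∃ m : Nat, i = (m : Int) := ⟨i.toNat, by omega⟩
      exact (Nat.prime_def_le_sqrt.mp hNp).2 m (by exact_mod_cast hi.1) (by omega)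
        (by exact_mod_cast hmod)
    rw [hflat]
    simp
  · rcases rest with _ | ⟨r, rest⟩
    · -- N = p * q semiprime
      have hpq : p * q = N := by
        have hprod := Nat.prod_primeFactorsList hNne
        rw [hL] at hprod; simpa using hprod
      have hp : p.Prime := Nat.prime_of_mem_primeFactorsList (hL ▸ List.mem_cons_self)
      have hq : q.Prime := Nat.prime_of_mem_primeFactorsList
        (hL ▸ List.mem_cons_of_mem _ List.mem_cons_self)
      have hple : p ≤ q := by
        have hunf : N.primeFactorsList = N.minFac :: (N / N.minFac).primeFactorsList := by
          obtain ⟨m, rfl⟩ : ∃ m, N = m + 2 := ⟨N - 2, by omega⟩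
          rw [Nat.primeFactorsList]
        rw [hL] at hunf
        have hpmf : p = N.minFac := by injection hunf
        have hqd : q ∣ N := by exact Dvd.intro_left p hpq
        rw [hpmf]
        exact Nat.minFac_le_of_dvd hq.two_le hqd
      have hpsq : p ≤ Nat.sqrt N := Nat.le_sqrt.mpr (by nlinarith [hp.pos, hq.pos])
      have hmemp : ((p : Nat) : Int) ∈ PySem.List.pyRange 2 (Int.sqrt (N : Int) + 1) 1 := by
        rw [PySem.List.mem_pyRange_one, Int.sqrt_natCast]
        constructor
        · exact_mod_cast hp.two_le
        · have : (p : Int) ≤ (Nat.sqrt N : Int) := by exact_mod_cast hpsq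
          omega
      have hflat : (PySem.List.pyRange 2 (Int.sqrt (N : Int) + 1) 1).flatMap
          (fun i => if PySem.Int.mod (N : Int) i == 0 then gA (N : Int) i else []) =
          (if PySem.Int.mod (N : Int) (p : Int) == 0 then gA (N : Int) (p : Int) else []) := by
        apply flatMap_single _ _ _ hmemp (PySem.List.nodup_pyRange_one _ _)
        intro x hxmem hxne
        rw [PySem.List.mem_pyRange_one, Int.sqrt_natCast] at hxmem
        by_cases hmod : (PySem.Int.mod (N : Int) x == 0) = true
        · exfalso
          rw [beq_iff_eq, PySem.Int.mod_eq_zero_iff_dvd] at hmod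
          obtain ⟨m, rfl⟩ : ∃ m : Nat, x = (m : Int) := ⟨x.toNat, by omega⟩
          have hmp : m = p := by
            apply semiprime_divisor_in_range p q m hp hq hple
            · exact_mod_cast hxmem.1
            · rw [hpq]; omega
            · rw [hpq]; exact_mod_cast hmod
          exact hxne (by rw [hmp])
        · simp [hmod]
      rw [hflat]
      have hmodp : (PySem.Int.mod (N : Int) (p : Int) == 0) = true := by
        rw [beq_iff_eq, PySem.Int.mod_eq_zero_iff_dvd]
        exact_mod_cast Dvd.intro q hpq
      rw [if_pos hmodp]
      have hfd : PySem.Int.floordiv (N : Int) (p : Int) = ((q : Nat) : Int) := by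
        rw [PySem.Int.floordiv_natCast N p]
        congr 1
        rw [← hpq]
        exact Nat.mul_div_cancel_left q hp.pos
      unfold gA
      rw [hfd, (isPrime_iff p).mpr hp, (isPrime_iff q).mpr hq]
      simp only [Bool.true_and]
      have hcast : (p : Int) * (q : Int) = (N : Int) := by exact_mod_cast hpq
      by_cases h5p : one5 (p : Int) = true <;> by_cases h5q : one5 (q : Int) = true <;>
        simp [h5p, h5q, hcast, pyGetD_pair, PySem.List.len_eq,
          max_eq_right (show (p:Int) ≤ (q:Int) from by exact_mod_cast hple)]
    · -- three or more prime factors: both return 0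
      rcases hD : (PySem.List.pyRange 2 (Int.sqrt (N : Int) + 1) 1).flatMap
          (fun i => if PySem.Int.mod (N : Int) i == 0 then gA (N : Int) i else []) with
        _ | ⟨a, _ | ⟨b, _ | ⟨c, tl⟩⟩⟩
      · simp; omega
      · simp; omega
      · by_cases hab : ((a * b : Int) == (N : Int)) = true
        · exfalso
          obtain ⟨am, rfl, hap⟩ := mem_dA N a (by rw [hD]; simp)
          obtain ⟨bm, rfl, hbp⟩ := mem_dA N b (by rw [hD]; simp)
          have hprodab : am * bm = N := by exact_mod_cast (beq_iff_eq.mp hab)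
          have hperm := Nat.perm_primeFactorsList_mul (a := am) (b := bm)
            (by exact_mod_cast hap.pos.ne') (by exact_mod_cast hbp.pos.ne')
          have hlen : (am * bm).primeFactorsList.length = 2 := by
            rw [hperm.length_eq, Nat.primeFactorsList_prime hap, Nat.primeFactorsList_prime hbp]
            rfl
          rw [hprodab, hL] at hlen
          simp at hlen
        · simp [hab]; omega
      · simp; omega

-- ===== VERDICT (by name: the statement is the Claim_ definition above) =====
theorem f_spec : Claim_equal_f := by
  intro num hd hpre
  unfold Spec_f
  by_cases h2 : 2 ≤ num
  · exact f_spec_ge2 num hd h2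
  · unfold Pre_f at hpre
    have h01 : num = 0 ∨ num = 1 := by omega
    rcases h01 with rfl | rfl
    · show f 0 = f_alt 0
      simp [f, f_alt, Int.sqrt, PySem.List.pyRange_one_eq_nil (by norm_num : (1:Int) ≤ 2)]
    · show f 1 = f_alt 1
      simp [f, f_alt, Int.sqrt, PySem.List.pyRange_one_eq_nil (by norm_num : (2:Int) ≤ 2)]
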